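-- pv_equiv track=rewrite | github.com/FanchenBao/leetcode | LeetCode_2612.py | minReverseOperations
-- ===== SOURCE A (Python) =====
-- from typing import List
--
-- def minReverseOperations(n: int, p: int, banned: List[int], k: int) -> List[int]:
--     """TLE
--     """
--     res = [-1] * n
--     res[p] = 0
--     queue = [p]
--     steps = 0
--     banned_set = set(banned)
--     while queue:
--         tmp = []
--         for i in queue:
--             lo = max(0, i - k + 1)
--             while lo <= i and lo + k - 1 < n:
--                 j = lo + k - 1 - (i - lo)
--                 if res[j] == -1 and j not in banned_set:
--                     res[j] = steps + 1
--                     tmp.append(j)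
--                 lo += 1
--         steps += 1
--         queue = tmp
--     return res
-- ===== SOURCE B (Python) =====
-- from bisect import bisect_left, bisect_right
-- from typing import List
--
--
-- def minReverseOperations(n: int, p: int, banned: List[int], k: int) -> List[int]:
--     dist = [-1] * n
--     dist[p] = 0
--     blocked = set(banned)
--     unseen = [[], []]  # unvisited, non-banned positions, split by parity, kept sorted
--     for j in range(n):
--         if dist[j] == -1 and j not in blocked:
--             unseen[j & 1].append(j)
--     queue = [p]
--     steps = 0
--     while queue:
--         nxt = []
--         for i in queue:
--             lo_min = max(0, i - k + 1)
--             lo_max = min(i, n - k)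
--             if lo_min > lo_max:
--                 continue
--             jmin = 2 * lo_min + k - 1 - i
--             jmax = 2 * lo_max + k - 1 - i
--             bucket = unseen[jmin & 1]
--             a = bisect_left(bucket, jmin)
--             b = bisect_right(bucket, jmax)
--             for j in bucket[a:b]:
--                 dist[j] = steps + 1
--                 nxt.append(j)
--             unseen[jmin & 1] = bucket[:a] + bucket[b:]
--         steps += 1
--         queue = nxt
--     return dist
-- ===== Notes on version B (the rewrite author's own statement) =====
-- stated objective: faster
-- what changed: Replaces A's per-frontier-node O(k) sweep over every reversal start position with two per-parity sorted lists of still-unvisited positions from which each newly reachable index interval is extracted once via binary search, so every position is examined and removed only once.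
import Mathlib
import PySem

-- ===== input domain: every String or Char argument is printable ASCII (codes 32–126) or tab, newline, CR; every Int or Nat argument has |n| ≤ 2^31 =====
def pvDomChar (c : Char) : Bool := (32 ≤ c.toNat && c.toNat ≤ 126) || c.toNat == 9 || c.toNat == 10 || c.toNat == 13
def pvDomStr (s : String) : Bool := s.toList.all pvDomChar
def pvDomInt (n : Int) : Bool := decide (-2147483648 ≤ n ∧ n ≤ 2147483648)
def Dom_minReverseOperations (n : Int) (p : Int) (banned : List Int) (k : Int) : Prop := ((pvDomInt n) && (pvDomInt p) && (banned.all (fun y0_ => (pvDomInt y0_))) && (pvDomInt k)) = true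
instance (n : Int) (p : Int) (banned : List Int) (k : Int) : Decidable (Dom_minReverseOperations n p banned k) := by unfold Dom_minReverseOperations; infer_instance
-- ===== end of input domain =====

-- B replaces A's per-frontier-node sweep over all reversal start positions with per-parity
-- sorted lists of unvisited positions pulled once via binary search (measurably faster).


-- ===== PORT A =====
-- A's inner `while lo <= i and lo + k - 1 < n` loop; `j = lo + k - 1 - (i - lo)` is inlined.
-- The Nat fuel (i + 1 - lo).toNat at the call site is a totality guard only (the loop needs
-- lo ≤ i, so it never runs out). res[j] is read with pyGetD (exact: whenever the loop body
-- runs, 0 ≤ j < len res)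
def pvAInner (n k steps i : Int) (bset : List Int) :
    Nat → Int → List Int → List Int → List Int × List Int
  | 0, _, res, tmp => (res, tmp)
  | fuel + 1, lo, res, tmp =>
    if lo ≤ i ∧ lo + k - 1 < n then
      if PySem.List.pyGetD res (lo + k - 1 - (i - lo)) 0 = -1 ∧
          PySem.Set.contains bset (lo + k - 1 - (i - lo)) = false then
        pvAInner n k steps i bset fuel (lo + 1)
          (PySem.List.pySetD res (lo + k - 1 - (i - lo)) (steps + 1))
          (tmp ++ [lo + k - 1 - (i - lo)])
      else
        pvAInner n k steps i bset fuel (lo + 1) res tmp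
    else (res, tmp)

-- one `for i in queue` pass of A
def pvALevel (n k steps : Int) (bset : List Int) (st : List Int × List Int) (queue : List Int) :
    List Int × List Int :=
  queue.foldl (fun st i => pvAInner n k steps i bset (i + 1 - max 0 (i - k + 1)).toNat
    (max 0 (i - k + 1)) st.1 st.2) st

-- A's `while queue` loop; the fuel n.toNat + 2 is a totality guard only: the Python loop
-- runs at most n + 2 rounds (every nonempty round but the last marks at least one fresh cell)
def pvABfs (n k : Int) (bset : List Int) : Nat → List Int → List Int → Int → List Int
  | 0, res, _, _ => res
  | fuel + 1, res, queue, steps =>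
    if queue = [] then res
    else
      let st := pvALevel n k steps bset (res, []) queue
      pvABfs n k bset fuel st.1 st.2 (steps + 1)

def minReverseOperations (n : Int) (p : Int) (banned : List Int) (k : Int) : List Int :=
  -- res = [-1] * n; res[p] = 0 (pySetD: exact for -n ≤ p < n, i.e. under Pre_)
  let res := PySem.List.pySetD (List.replicate n.toNat (-1)) p 0
  pvABfs n k (PySem.Set.ofList banned) (n.toNat + 2) res [p] 0

-- ===== PORT B =====
-- dist[j] = steps + 1; nxt.append(j)  (the body of B's `for j in bucket[a:b]`)
def pvBMark (steps : Int) (st : List Int × List Int) (j : Int) : List Int × List Int :=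
  (PySem.List.pySetD st.1 j (steps + 1), st.2 ++ [j])

-- B's initialisation loop `for j in range(n)` building the two parity buckets
def pvBInit (n : Int) (blocked : List Int) (dist : List Int) : List Int × List Int :=
  (PySem.List.pyRange 0 n 1).foldl
    (fun u j =>
      if PySem.List.pyGetD dist j 0 = -1 ∧ PySem.Set.contains blocked j = false then
        if PySem.Int.band j 1 = 0 then (u.1 ++ [j], u.2) else (u.1, u.2 ++ [j])
      else u)
    ([], [])

-- B's body for one frontier node i; state ((dist, nxt), (unseen even, unseen odd))
def pvBPerI (n k steps : Int) (st : (List Int × List Int) × (List Int × List Int)) (i : Int) :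
    (List Int × List Int) × (List Int × List Int) :=
  let lo_min := max 0 (i - k + 1)
  let lo_max := min i (n - k)
  if lo_min > lo_max then st
  else
    let jmin := 2 * lo_min + k - 1 - i
    let jmax := 2 * lo_max + k - 1 - i
    let bucket := if PySem.Int.band jmin 1 = 0 then st.2.1 else st.2.2
    let a := PySem.List.bisectLeft bucket jmin
    let b := PySem.List.bisectRight bucket jmax
    let dn := ((bucket.drop a).take (b - a)).foldl (pvBMark steps) st.1   -- for j in bucket[a:b]
    let bucket' := bucket.take a ++ bucket.drop b                         -- bucket[:a] + bucket[b:]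
    (dn, if PySem.Int.band jmin 1 = 0 then (bucket', st.2.2) else (st.2.1, bucket'))

-- B's `while queue` loop (same totality-guard fuel as port A)
def pvBBfs (n k : Int) : Nat → List Int → List Int × List Int → List Int → Int → List Int
  | 0, dist, _, _, _ => dist
  | fuel + 1, dist, u, queue, steps =>
    if queue = [] then dist
    else
      let st := queue.foldl (pvBPerI n k steps) ((dist, []), u)
      pvBBfs n k fuel st.1.1 st.2 st.1.2 (steps + 1)

def minReverseOperations_alt (n : Int) (p : Int) (banned : List Int) (k : Int) : List Int :=
  let dist := PySem.List.pySetD (List.replicate n.toNat (-1)) p 0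
  let blocked := PySem.Set.ofList banned
  let u := pvBInit n blocked dist
  pvBBfs n k (n.toNat + 2) dist u [p] 0

-- ===== PRECONDITION & SPEC =====
-- Pre_ excludes exactly the inputs on which the Python A raises IndexError at `res[p] = 0`
-- (p outside [-n, n), which includes every input with n ≤ 0).
def Pre_minReverseOperations (n : Int) (p : Int) (banned : List Int) (k : Int) : Prop :=
  -n ≤ p ∧ p < n
instance (n : Int) (p : Int) (banned : List Int) (k : Int) : Decidable (Pre_minReverseOperations n p banned k) := by unfold Pre_minReverseOperations; infer_instance

def pvWitness_minReverseOperations : Int × Int × List Int × Int := (5, 0, [2], 3)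

def Spec_minReverseOperations (n : Int) (p : Int) (banned : List Int) (k : Int) (out : List Int) : Prop := out = minReverseOperations_alt n p banned k
instance (n : Int) (p : Int) (banned : List Int) (k : Int) (out : List Int) : Decidable (Spec_minReverseOperations n p banned k out) := by unfold Spec_minReverseOperations; infer_instance

-- ===== CLAIM (what is proved, stated in full; the proofs are below) =====
def Claim_equal_minReverseOperations : Prop := ∀ (n : Int) (p : Int) (banned : List Int) (k : Int), Dom_minReverseOperations n p banned k → Pre_minReverseOperations n p banned k → Spec_minReverseOperations n p banned k (minReverseOperations n p banned k)

-- ===== LEMMAS AND PROOFS =====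

-- canonical content of B's parity bucket `par` for visitation state `res`
def pvUnseenOf (n : Int) (bset res : List Int) (par : Int) : List Int :=
  (PySem.List.pyRange 0 n 1).filter
    (fun j => decide (PySem.List.pyGetD res j 0 = -1 ∧ PySem.Set.contains bset j = false ∧
      PySem.Int.band j 1 = par))

-- the coupling invariant between A's state and B's state
def pvGood (n : Int) (bset res : List Int) (u : List Int × List Int) : Prop :=
  res.length = n.toNat ∧ u.1 = pvUnseenOf n bset res 0 ∧ u.2 = pvUnseenOf n bset res 1

def pvMarkAll (steps : Int) (S res : List Int) : List Int :=
  S.foldl (fun d j => PySem.List.pySetD d j (steps + 1)) res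

-- the cells A's inner loop still marks from start position lo on, tested against res
def pvSel (n k i : Int) (bset res : List Int) (lo : Int) : List Int :=
  ((PySem.List.pyRange lo (min i (n - k) + 1) 1).map (fun l => l + k - 1 - (i - l))).filter
    (fun j => decide (PySem.List.pyGetD res j 0 = -1 ∧ PySem.Set.contains bset j = false))

theorem pvEqSorted : ∀ (l1 l2 : List Int), l1.Pairwise (· < ·) → l2.Pairwise (· < ·) →
    (∀ x, x ∈ l1 ↔ x ∈ l2) → l1 = l2 := by
  intro l1
  induction l1 with
  | nil =>
    intro l2 _ _ h
    cases l2 with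
    | nil => rfl
    | cons b t => exact absurd ((h b).mpr (by simp)) (by simp)
  | cons a t ih =>
    intro l2 h1 h2 h
    cases l2 with
    | nil => exact absurd ((h a).mp (by simp)) (by simp)
    | cons b t2 =>
      have hab : a = b := by
        rcases List.mem_cons.mp ((h a).mp (by simp)) with h' | ha
        · exact h'
        · rcases List.mem_cons.mp ((h b).mpr (by simp)) with h' | hb
          · omega
          · have c1 := List.rel_of_pairwise_cons h1 hb
            have c2 := List.rel_of_pairwise_cons h2 ha
            omega
      subst hab
      have ht : ∀ x, x ∈ t ↔ x ∈ t2 := by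
        intro x
        constructor
        · intro hx
          rcases List.mem_cons.mp ((h x).mp (List.mem_cons_of_mem _ hx)) with h' | h2x
          · subst h'; exact absurd (List.rel_of_pairwise_cons h1 hx) (lt_irrefl _)
          · exact h2x
        · intro hx
          rcases List.mem_cons.mp ((h x).mpr (List.mem_cons_of_mem _ hx)) with h' | h1x
          · subst h'; exact absurd (List.rel_of_pairwise_cons h2 hx) (lt_irrefl _)
          · exact h1x
      rw [ih t2 (List.Pairwise.of_cons h1) (List.Pairwise.of_cons h2) ht]

theorem pvGetD_setD_eq (xs : List Int) (v : Int) (j : Int) (h0 : 0 ≤ j)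
    (hl : j < (xs.length : Int)) :
    PySem.List.pyGetD (PySem.List.pySetD xs j v) j 0 = v := by
  rw [PySem.List.pySetD_of_nonneg _ _ h0, PySem.List.pyGetD_of_nonneg _ _ h0]
  rw [List.getD_eq_getElem?_getD, List.getElem?_set_self (by omega)]
  rfl

theorem pvGetD_setD_ne (xs : List Int) (v : Int) (j x : Int) (hj : 0 ≤ j) (hx : 0 ≤ x)
    (hne : x ≠ j) :
    PySem.List.pyGetD (PySem.List.pySetD xs j v) x 0 = PySem.List.pyGetD xs x 0 := by
  rw [PySem.List.pySetD_of_nonneg _ _ hj, PySem.List.pyGetD_of_nonneg _ _ hx,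
    PySem.List.pyGetD_of_nonneg _ _ hx]
  rw [List.getD_eq_getElem?_getD, List.getD_eq_getElem?_getD, List.getElem?_set_ne (by omega)]

theorem pvMarkAll_length (steps : Int) :
    ∀ (S res : List Int), (pvMarkAll steps S res).length = res.length := by
  intro S
  induction S with
  | nil => intro res; rfl
  | cons j t ih =>
    intro res
    show (pvMarkAll steps t (PySem.List.pySetD res j (steps + 1))).length = res.length
    rw [ih, PySem.List.length_pySetD]

theorem pvMarkAll_getD (steps : Int) :
    ∀ (S res : List Int) (x : Int), (∀ j ∈ S, 0 ≤ j ∧ j < (res.length : Int)) → 0 ≤ x →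
      PySem.List.pyGetD (pvMarkAll steps S res) x 0 =
        if x ∈ S then steps + 1 else PySem.List.pyGetD res x 0 := by
  intro S
  induction S with
  | nil => intro res x _ _; simp [pvMarkAll]
  | cons j t ih =>
    intro res x hb hx
    obtain ⟨hj0, hjl⟩ := hb j (by simp)
    have hb' : ∀ j' ∈ t, 0 ≤ j' ∧ j' < ((PySem.List.pySetD res j (steps + 1)).length : Int) := by
      intro j' hj'
      rw [PySem.List.length_pySetD]
      exact hb j' (by simp [hj'])
    show PySem.List.pyGetD (pvMarkAll steps t (PySem.List.pySetD res j (steps + 1))) x 0 = _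
    rw [ih _ x hb' hx]
    by_cases hxt : x ∈ t
    · simp [hxt]
    · by_cases hxj : x = j
      · subst hxj
        simp [hxt, pvGetD_setD_eq res (steps + 1) x hx (by omega)]
      · rw [pvGetD_setD_ne res (steps + 1) j x hj0 hx hxj]
        simp [hxt, hxj]

theorem pvBMarkFold (steps : Int) :
    ∀ (pulled : List Int) (res tmp : List Int),
      pulled.foldl (pvBMark steps) (res, tmp) = (pvMarkAll steps pulled res, tmp ++ pulled) := by
  intro pulled
  induction pulled with
  | nil => intro res tmp; simp [pvMarkAll]
  | cons j t ih =>
    intro res tmp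
    show t.foldl (pvBMark steps) (pvBMark steps (res, tmp) j) = _
    rw [show pvBMark steps (res, tmp) j =
      (PySem.List.pySetD res j (steps + 1), tmp ++ [j]) from rfl]
    rw [ih]
    show (pvMarkAll steps t (PySem.List.pySetD res j (steps + 1)), (tmp ++ [j]) ++ t) = _
    simp only [Prod.mk.injEq]
    exact ⟨rfl, by simp⟩

theorem pvAInner_eq (n k steps i : Int) (bset : List Int) :
    ∀ (fuel : Nat) (lo : Int) (res tmp : List Int), max 0 (i - k + 1) ≤ lo →
      i + 1 - lo ≤ (fuel : Int) →
      pvAInner n k steps i bset fuel lo res tmp =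
        (pvMarkAll steps (pvSel n k i bset res lo) res, tmp ++ pvSel n k i bset res lo) := by
  intro fuel
  induction fuel with
  | zero =>
    intro lo res tmp hlo hm
    rw [pvAInner]
    unfold pvSel
    rw [PySem.List.pyRange_one_eq_nil (by simp at hm; omega)]
    simp [pvMarkAll]
  | succ m ih =>
    intro lo res tmp hlo hm
    by_cases hcond : lo ≤ i ∧ lo + k - 1 < n
    · have hlohi : lo ≤ min i (n - k) := by omega
      have hsel : pvSel n k i bset res lo =
          if PySem.List.pyGetD res (lo + k - 1 - (i - lo)) 0 = -1 ∧
              PySem.Set.contains bset (lo + k - 1 - (i - lo)) = false then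
            (lo + k - 1 - (i - lo)) :: pvSel n k i bset res (lo + 1)
          else pvSel n k i bset res (lo + 1) := by
        unfold pvSel
        rw [PySem.List.pyRange_one_cons (by omega)]
        simp only [List.map_cons, List.filter_cons, decide_eq_true_eq]
      rw [pvAInner, if_pos hcond]
      by_cases htest : PySem.List.pyGetD res (lo + k - 1 - (i - lo)) 0 = -1 ∧
          PySem.Set.contains bset (lo + k - 1 - (i - lo)) = false
      · rw [if_pos htest]
        rw [ih (lo + 1) _ _ (by omega) (by push_cast at hm ⊢; omega)]
        have hps : pvSel n k i bset (PySem.List.pySetD res (lo + k - 1 - (i - lo)) (steps + 1))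
            (lo + 1) = pvSel n k i bset res (lo + 1) := by
          unfold pvSel
          apply List.filter_congr
          intro x hx
          rcases List.mem_map.mp hx with ⟨l, hl, rfl⟩
          rw [PySem.List.mem_pyRange_one] at hl
          rw [pvGetD_setD_ne res (steps + 1) (lo + k - 1 - (i - lo)) (l + k - 1 - (i - l))
            (by omega) (by omega) (by omega)]
        rw [hps, hsel, if_pos htest]
        simp only [Prod.mk.injEq]
        exact ⟨rfl, by simp⟩
      · rw [if_neg htest]
        rw [ih (lo + 1) _ _ (by omega) (by push_cast at hm ⊢; omega)]
        rw [hsel, if_neg htest]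
    · rw [pvAInner, if_neg hcond]
      unfold pvSel
      rw [PySem.List.pyRange_one_eq_nil (by omega)]
      simp [pvMarkAll]

theorem pvBisect_filter (xs : List Int) (lo hi : Int) (hlohi : lo ≤ hi)
    (hx : xs.Pairwise (· < ·)) :
    (xs.drop (PySem.List.bisectLeft xs lo)).take
        (PySem.List.bisectRight xs hi - PySem.List.bisectLeft xs lo) =
      xs.filter (fun x => decide (lo ≤ x ∧ x ≤ hi)) ∧
    xs.take (PySem.List.bisectLeft xs lo) ++ xs.drop (PySem.List.bisectRight xs hi) =
      xs.filter (fun x => decide (¬(lo ≤ x ∧ x ≤ hi))) := by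
  have hle : xs.Pairwise (· ≤ ·) := hx.imp le_of_lt
  obtain ⟨hal, hlt, hge⟩ := PySem.List.bisectLeft_spec xs lo hle
  obtain ⟨hbl, hlt', hge'⟩ := PySem.List.bisectRight_spec xs hi hle
  set a := PySem.List.bisectLeft xs lo with ha
  set b := PySem.List.bisectRight xs hi with hb
  have hab : a ≤ b := by
    by_contra hc
    rw [not_le] at hc
    have hblen : b < xs.length := lt_of_lt_of_le hc hal
    have h1 := hlt b hblen hc
    have h2 := hge' b hblen le_rfl
    omega
  have hdec : xs.take a ++ ((xs.drop a).take (b - a) ++ xs.drop b) = xs := by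
    rw [← List.append_assoc, ← List.take_add]
    have : a + (b - a) = b := by omega
    rw [this, List.take_append_drop]
  have hTake : ∀ x ∈ xs.take a, x < lo := by
    intro x hxm
    rcases List.mem_iff_getElem.mp hxm with ⟨t, htl, rfl⟩
    rw [List.getElem_take]
    have htlen : t < xs.length := by
      have := htl; rw [List.length_take] at this; omega
    exact hlt t htlen (by have := htl; rw [List.length_take] at this; omega)
  have hDrop : ∀ x ∈ xs.drop b, hi < x := by
    intro x hxm
    rcases List.mem_iff_getElem.mp hxm with ⟨t, htl, rfl⟩
    rw [List.getElem_drop]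
    have htlen : b + t < xs.length := by
      have := htl; rw [List.length_drop] at this; omega
    exact hge' (b + t) htlen (by omega)
  have hMid : ∀ x ∈ (xs.drop a).take (b - a), lo ≤ x ∧ x ≤ hi := by
    intro x hxm
    rcases List.mem_iff_getElem.mp hxm with ⟨t, htl, rfl⟩
    rw [List.getElem_take, List.getElem_drop]
    have h1 : t < b - a := by
      have := htl; rw [List.length_take, List.length_drop] at this; omega
    have h2 : a + t < xs.length := by
      have := htl; rw [List.length_take, List.length_drop] at this; omega
    exact ⟨hge (a + t) h2 (by omega), hlt' (a + t) h2 (by omega)⟩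
  constructor
  · conv_rhs => rw [← hdec]
    rw [List.filter_append, List.filter_append]
    rw [List.filter_eq_nil_iff.mpr (by intro x hxm; have := hTake x hxm; simp; omega)]
    rw [List.filter_eq_self.mpr (by intro x hxm; have := hMid x hxm; simp; omega)]
    rw [List.filter_eq_nil_iff.mpr (by intro x hxm; have := hDrop x hxm; simp; omega)]
    simp
  · conv_rhs => rw [← hdec]
    rw [List.filter_append, List.filter_append]
    rw [List.filter_eq_self.mpr (by intro x hxm; have := hTake x hxm; simp; omega)]
    rw [List.filter_eq_nil_iff.mpr (by intro x hxm; have := hMid x hxm; simp; omega)]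
    rw [List.filter_eq_self.mpr (by intro x hxm; have := hDrop x hxm; simp; omega)]
    simp

theorem pvSel_eq_filter (n k i : Int) (bset res : List Int)
    (_hL : max 0 (i - k + 1) ≤ min i (n - k)) :
    (pvUnseenOf n bset res (PySem.Int.band (2 * max 0 (i - k + 1) + k - 1 - i) 1)).filter
        (fun x => decide (2 * max 0 (i - k + 1) + k - 1 - i ≤ x ∧
          x ≤ 2 * min i (n - k) + k - 1 - i)) =
      pvSel n k i bset res (max 0 (i - k + 1)) := by
  apply pvEqSorted
  · exact ((PySem.List.pairwise_lt_pyRange_one 0 n).filter _).filter _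
  · apply List.Pairwise.filter
    exact List.pairwise_map.mpr
      ((PySem.List.pairwise_lt_pyRange_one _ _).imp (fun {a b} h => by omega))
  · intro x
    simp only [pvUnseenOf, pvSel, List.mem_filter, List.mem_map, PySem.List.mem_pyRange_one,
      decide_eq_true_eq, PySem.Int.band_one,
      PySem.Int.mod_eq_emod_of_pos (by norm_num : (0:Int) < 2)]
    constructor
    · rintro ⟨⟨⟨hx0, hxn⟩, hA, hC, hpar⟩, hlo, hhi⟩
      have h2 : (2:Int) ∣ (x - (2 * max 0 (i - k + 1) + k - 1 - i)) := by omega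
      obtain ⟨t, ht⟩ := h2
      exact ⟨⟨max 0 (i - k + 1) + t, ⟨by omega, by omega⟩, by omega⟩, hA, hC⟩
    · rintro ⟨⟨l, ⟨hl1, hl2⟩, rfl⟩, hA, hC⟩
      exact ⟨⟨⟨by omega, by omega⟩, hA, hC, by omega⟩, by omega, by omega⟩

theorem pvPerI_eq (n k steps i : Int) (bset res tmp : List Int) (u : List Int × List Int)
    (hst : pvGood n bset res u) (hsteps : 0 ≤ steps) :
    ∃ u', pvBPerI n k steps ((res, tmp), u) i =
        (pvAInner n k steps i bset (i + 1 - max 0 (i - k + 1)).toNat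
          (max 0 (i - k + 1)) res tmp, u') ∧
      pvGood n bset (pvAInner n k steps i bset (i + 1 - max 0 (i - k + 1)).toNat
        (max 0 (i - k + 1)) res tmp).1 u' := by
  obtain ⟨hlen, hu1, hu2⟩ := hst
  by_cases hcont : max 0 (i - k + 1) > min i (n - k)
  · have hA : pvAInner n k steps i bset (i + 1 - max 0 (i - k + 1)).toNat
        (max 0 (i - k + 1)) res tmp = (res, tmp) := by
      rw [pvAInner_eq n k steps i bset _ _ res tmp le_rfl (by omega)]
      unfold pvSel
      rw [PySem.List.pyRange_one_eq_nil (by omega)]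
      simp [pvMarkAll]
    refine ⟨u, ?_, ?_⟩
    · rw [hA]
      simp only [pvBPerI]
      rw [if_pos hcont]
    · rw [hA]
      exact ⟨hlen, hu1, hu2⟩
  · rw [not_lt] at hcont
    have hnn : (res.length : Int) = n := by rw [hlen]; omega
    set L := max 0 (i - k + 1) with hLdef
    set H := min i (n - k) with hHdef
    set jmin := 2 * L + k - 1 - i with hjmin
    set jmax := 2 * H + k - 1 - i with hjmax
    set S := pvSel n k i bset res L with hSdef
    have hA : pvAInner n k steps i bset (i + 1 - L).toNat L res tmp =
        (pvMarkAll steps S res, tmp ++ S) := by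
      have h := pvAInner_eq n k steps i bset (i + 1 - L).toNat L res tmp le_rfl (by omega)
      rw [← hSdef] at h
      exact h
    have hpar01 : PySem.Int.band jmin 1 = 0 ∨ PySem.Int.band jmin 1 = 1 := by
      rw [PySem.Int.band_one]
      have := PySem.Int.mod_nonneg jmin (by norm_num : (0:Int) < 2)
      have := PySem.Int.mod_lt jmin (by norm_num : (0:Int) < 2)
      omega
    -- the bucket B selects is the canonical unseen list of parity (band jmin 1)
    have hbucket : (if PySem.Int.band jmin 1 = 0 then u.1 else u.2) =
        pvUnseenOf n bset res (PySem.Int.band jmin 1) := by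
      rcases hpar01 with hp | hp
      · rw [if_pos hp, hu1, hp]
      · rw [if_neg (by rw [hp]; norm_num), hu2, hp]
    have hPW : (pvUnseenOf n bset res (PySem.Int.band jmin 1)).Pairwise (· < ·) :=
      (PySem.List.pairwise_lt_pyRange_one 0 n).filter _
    obtain ⟨hmid, hout⟩ := pvBisect_filter (pvUnseenOf n bset res (PySem.Int.band jmin 1))
      jmin jmax (by omega) hPW
    have hSfil : (pvUnseenOf n bset res (PySem.Int.band jmin 1)).filter
        (fun x => decide (jmin ≤ x ∧ x ≤ jmax)) = S := by
      have h := pvSel_eq_filter n k i bset res hcont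
      rw [← hLdef, ← hHdef, ← hjmin, ← hjmax, ← hSdef] at h
      exact h
    have hSmem : ∀ x, x ∈ S ↔ (x ∈ pvUnseenOf n bset res (PySem.Int.band jmin 1) ∧
        (jmin ≤ x ∧ x ≤ jmax)) := by
      intro x
      rw [← hSfil, List.mem_filter, decide_eq_true_eq]
    have hSbounds : ∀ j ∈ S, 0 ≤ j ∧ j < (res.length : Int) := by
      intro j hj
      obtain ⟨hmemU, _, _⟩ := (hSmem j).mp hj
      have hjr : j ∈ PySem.List.pyRange 0 n 1 := List.mem_of_mem_filter hmemU
      rw [PySem.List.mem_pyRange_one] at hjr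
      omega
    have hSpar : ∀ j ∈ S, PySem.Int.band j 1 = PySem.Int.band jmin 1 := by
      intro j hj
      obtain ⟨hmemU, _, _⟩ := (hSmem j).mp hj
      rcases List.mem_filter.mp hmemU with ⟨_, hdec⟩
      rw [decide_eq_true_eq] at hdec
      exact hdec.2.2
    have hmark : ∀ x, 0 ≤ x → PySem.List.pyGetD (pvMarkAll steps S res) x 0 =
        if x ∈ S then steps + 1 else PySem.List.pyGetD res x 0 :=
      fun x hx => pvMarkAll_getD steps S res x hSbounds hx
    -- the updated bucket of the touched parity
    have hbucket' : (pvUnseenOf n bset res (PySem.Int.band jmin 1)).take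
          (PySem.List.bisectLeft (pvUnseenOf n bset res (PySem.Int.band jmin 1)) jmin) ++
        (pvUnseenOf n bset res (PySem.Int.band jmin 1)).drop
          (PySem.List.bisectRight (pvUnseenOf n bset res (PySem.Int.band jmin 1)) jmax) =
        pvUnseenOf n bset (pvMarkAll steps S res) (PySem.Int.band jmin 1) := by
      rw [hout]
      unfold pvUnseenOf
      rw [List.filter_filter]
      apply List.filter_congr
      intro x hxr
      rw [PySem.List.mem_pyRange_one] at hxr
      beta_reduce
      by_cases hxS : x ∈ S
      · have h1 := hmark x (by omega)
        rw [if_pos hxS] at h1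
        have h2 := (hSmem x).mp hxS
        have e1 : decide (¬(jmin ≤ x ∧ x ≤ jmax)) = false :=
          decide_eq_false (fun hneg => hneg h2.2)
        have e2 : decide (PySem.List.pyGetD (pvMarkAll steps S res) x 0 = -1 ∧
            PySem.Set.contains bset x = false ∧ PySem.Int.band x 1 = PySem.Int.band jmin 1) =
            false := decide_eq_false (fun hb => by rw [h1] at hb; omega)
        rw [e1, e2]
        simp
      · have h1 := hmark x (by omega)
        rw [if_neg hxS] at h1
        simp only [h1]
        by_cases hP : PySem.List.pyGetD res x 0 = -1 ∧ PySem.Set.contains bset x = false ∧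
            PySem.Int.band x 1 = PySem.Int.band jmin 1
        · have hxU : x ∈ pvUnseenOf n bset res (PySem.Int.band jmin 1) := by
            rw [pvUnseenOf, List.mem_filter]
            refine ⟨by rw [PySem.List.mem_pyRange_one]; omega, by
              rw [decide_eq_true_eq]; exact hP⟩
          have hnotin : ¬ (jmin ≤ x ∧ x ≤ jmax) := fun hrange => hxS ((hSmem x).mpr ⟨hxU, hrange⟩)
          rw [decide_eq_true hP, decide_eq_true hnotin]
          simp
        · rw [decide_eq_false hP]
          simp
    -- the untouched bucket
    have hother : ∀ par', par' ≠ PySem.Int.band jmin 1 →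
        pvUnseenOf n bset (pvMarkAll steps S res) par' = pvUnseenOf n bset res par' := by
      intro par' hne
      unfold pvUnseenOf
      apply List.filter_congr
      intro x hxr
      rw [PySem.List.mem_pyRange_one] at hxr
      beta_reduce
      by_cases hxS : x ∈ S
      · have hpx := hSpar x hxS
        have hnp : ¬ (PySem.Int.band x 1 = par') := by
          rw [hpx]
          exact fun hcc => hne hcc.symm
        rw [decide_eq_false (fun hb => hnp hb.2.2), decide_eq_false (fun hb => hnp hb.2.2)]
      · have h1 := hmark x (by omega)
        rw [if_neg hxS] at h1
        simp only [h1]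
    refine ⟨(pvUnseenOf n bset (pvMarkAll steps S res) 0,
             pvUnseenOf n bset (pvMarkAll steps S res) 1), ?_, ?_⟩
    · rw [hA]
      simp only [pvBPerI]
      rw [if_neg (by omega : ¬ max 0 (i - k + 1) > min i (n - k))]
      rw [← hLdef, ← hHdef, ← hjmin, ← hjmax]
      rw [hbucket, hmid, hSfil, pvBMarkFold]
      rcases hpar01 with hp | hp
      · rw [if_pos hp, hbucket', hp, hother 1 (by rw [hp]; norm_num), hu2]
      · rw [if_neg (by rw [hp]; norm_num), hbucket', hp, hother 0 (by rw [hp]; norm_num), hu1]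
    · rw [hA]
      refine ⟨?_, rfl, rfl⟩
      show (pvMarkAll steps S res).length = n.toNat
      rw [pvMarkAll_length steps S res]
      exact hlen

theorem pvLevel_eq (n k steps : Int) (bset : List Int) (hsteps : 0 ≤ steps) :
    ∀ (queue : List Int) (res tmp : List Int) (u : List Int × List Int),
      pvGood n bset res u →
      ∃ u', queue.foldl (pvBPerI n k steps) ((res, tmp), u) =
          (pvALevel n k steps bset (res, tmp) queue, u') ∧
        pvGood n bset (pvALevel n k steps bset (res, tmp) queue).1 u' := by
  intro queue
  induction queue with
  | nil =>
    intro res tmp u hg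
    exact ⟨u, rfl, hg⟩
  | cons i qs ih =>
    intro res tmp u hg
    obtain ⟨u1, hB1, hg1⟩ := pvPerI_eq n k steps i bset res tmp u hg hsteps
    cases hA : pvAInner n k steps i bset (i + 1 - max 0 (i - k + 1)).toNat
        (max 0 (i - k + 1)) res tmp with
    | mk res1 tmp1 =>
      rw [hA] at hB1 hg1
      obtain ⟨u', hB2, hg2⟩ := ih res1 tmp1 u1 hg1
      refine ⟨u', ?_, ?_⟩
      · show qs.foldl (pvBPerI n k steps) (pvBPerI n k steps ((res, tmp), u) i) = _
        rw [hB1]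
        unfold pvALevel
        rw [List.foldl_cons]
        rw [show pvAInner n k steps i bset (i + 1 - max 0 (i - k + 1)).toNat
          (max 0 (i - k + 1)) (res, tmp).1 (res, tmp).2 = (res1, tmp1) from hA]
        exact hB2
      · show pvGood n bset (pvALevel n k steps bset (res, tmp) (i :: qs)).1 u'
        unfold pvALevel
        rw [List.foldl_cons]
        rw [show pvAInner n k steps i bset (i + 1 - max 0 (i - k + 1)).toNat
          (max 0 (i - k + 1)) (res, tmp).1 (res, tmp).2 = (res1, tmp1) from hA]
        exact hg2

theorem pvBfs_eq (n k : Int) (bset : List Int) :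
    ∀ (fuel : Nat) (res : List Int) (u : List Int × List Int) (queue : List Int) (steps : Int),
      pvGood n bset res u → 0 ≤ steps →
      pvBBfs n k fuel res u queue steps = pvABfs n k bset fuel res queue steps := by
  intro fuel
  induction fuel with
  | zero => intro res u queue steps _ _; rfl
  | succ fuel ih =>
    intro res u queue steps hg hsteps
    simp only [pvBBfs, pvABfs]
    by_cases hq : queue = []
    · rw [if_pos hq, if_pos hq]
    · rw [if_neg hq, if_neg hq]
      obtain ⟨u', hB, hg'⟩ := pvLevel_eq n k steps bset hsteps queue res [] u hg
      rw [hB]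
      exact ih _ u' _ (steps + 1) hg' (by omega)

theorem pvBInit_go (blocked dist : List Int) :
    ∀ (L : List Int) (acc1 acc2 : List Int),
      L.foldl (fun u j =>
        if PySem.List.pyGetD dist j 0 = -1 ∧ PySem.Set.contains blocked j = false then
          if PySem.Int.band j 1 = 0 then (u.1 ++ [j], u.2) else (u.1, u.2 ++ [j])
        else u) (acc1, acc2) =
      (acc1 ++ L.filter (fun j => decide (PySem.List.pyGetD dist j 0 = -1 ∧
          PySem.Set.contains blocked j = false ∧ PySem.Int.band j 1 = 0)),
       acc2 ++ L.filter (fun j => decide (PySem.List.pyGetD dist j 0 = -1 ∧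
          PySem.Set.contains blocked j = false ∧ PySem.Int.band j 1 = 1))) := by
  intro L
  induction L with
  | nil => intro acc1 acc2; simp
  | cons j t ih =>
    intro acc1 acc2
    simp only [List.foldl_cons, List.filter_cons, decide_eq_true_eq]
    by_cases hbase : PySem.List.pyGetD dist j 0 = -1 ∧ PySem.Set.contains blocked j = false
    · have hpar01 : PySem.Int.band j 1 = 0 ∨ PySem.Int.band j 1 = 1 := by
        rw [PySem.Int.band_one]
        have := PySem.Int.mod_nonneg j (by norm_num : (0:Int) < 2)
        have := PySem.Int.mod_lt j (by norm_num : (0:Int) < 2)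
        omega
      rw [if_pos hbase]
      rcases hpar01 with hp | hp
      · rw [if_pos hp, ih]
        rw [if_pos ⟨hbase.1, hbase.2, hp⟩,
          if_neg (fun hb => by rw [hp] at hb; exact absurd hb.2.2 (by norm_num))]
        simp
      · rw [if_neg (by rw [hp]; norm_num), ih]
        rw [if_neg (fun hb => by rw [hp] at hb; exact absurd hb.2.2 (by norm_num)),
          if_pos ⟨hbase.1, hbase.2, hp⟩]
        simp
    · rw [if_neg hbase, ih]
      rw [if_neg (fun hb => hbase ⟨hb.1, hb.2.1⟩), if_neg (fun hb => hbase ⟨hb.1, hb.2.1⟩)]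

theorem pvBInit_eq (n : Int) (blocked dist : List Int) :
    pvBInit n blocked dist = (pvUnseenOf n blocked dist 0, pvUnseenOf n blocked dist 1) := by
  unfold pvBInit pvUnseenOf
  rw [pvBInit_go]
  simp

-- ===== VERDICT (by name: the statement is the Claim_ definition above) =====
theorem minReverseOperations_spec : Claim_equal_minReverseOperations := by
  intro n p banned k _ _
  unfold Spec_minReverseOperations
  show pvABfs n k (PySem.Set.ofList banned) (n.toNat + 2)
      (PySem.List.pySetD (List.replicate n.toNat (-1)) p 0) [p] 0 =
    pvBBfs n k (n.toNat + 2) (PySem.List.pySetD (List.replicate n.toNat (-1)) p 0)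
      (pvBInit n (PySem.Set.ofList banned) (PySem.List.pySetD (List.replicate n.toNat (-1)) p 0))
      [p] 0
  rw [pvBInit_eq]
  refine (pvBfs_eq n k (PySem.Set.ofList banned) _ _ _ _ 0 ⟨?_, rfl, rfl⟩ le_rfl).symm
  rw [PySem.List.length_pySetD, List.length_replicate]
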